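-- pv_equiv track=rewrite | github.com/rwisecar/code-katas | src/string_pyramid.py | watch_pyramid_from_above
-- ===== SOURCE A (Python) =====
-- def watch_pyramid_from_above(characters):
--     """Show view of pyramid from the top."""
--     if characters:
--         pyramid = []
--         length = len(characters)
--         for i in range(length):
--             pyramid.append(
--                 characters[:i] + characters[i] * len(characters[i:]))
--         for i in range(length):
--             pyramid[i] += pyramid[i][-2::-1]
--         for i in range(length - 2, -1, -1):
--             pyramid.append(pyramid[i])
--         return "\n".join(pyramid)
--     return characters
-- ===== SOURCE B (Python) =====
-- def watch_pyramid_from_above(characters):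
--     """Show view of pyramid from the top."""
--     if characters:
--         size = 2 * len(characters) - 1
--         rows = []
--         for r in range(size):
--             i = min(r, size - 1 - r)       # ring index: distance to nearest top/bottom border
--             prefix = characters[:i]
--             rows.append(prefix + characters[i] * (size - 2 * i) + prefix[::-1])
--         return "\n".join(rows)
--     return characters
-- ===== Notes on version B (the rewrite author's own statement) =====
-- stated objective: simpler
-- what changed: Replaces A's three passes (build half-rows by slicing, horizontally mirror each row in place via [-2::-1], then vertically mirror by re-appending earlier rows) with a single loop that builds every row directly from the closed-form ring index i = min(r, size-1-r): prefix + characters[i]*(size-2*i) + reversed prefix.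
import Mathlib
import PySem

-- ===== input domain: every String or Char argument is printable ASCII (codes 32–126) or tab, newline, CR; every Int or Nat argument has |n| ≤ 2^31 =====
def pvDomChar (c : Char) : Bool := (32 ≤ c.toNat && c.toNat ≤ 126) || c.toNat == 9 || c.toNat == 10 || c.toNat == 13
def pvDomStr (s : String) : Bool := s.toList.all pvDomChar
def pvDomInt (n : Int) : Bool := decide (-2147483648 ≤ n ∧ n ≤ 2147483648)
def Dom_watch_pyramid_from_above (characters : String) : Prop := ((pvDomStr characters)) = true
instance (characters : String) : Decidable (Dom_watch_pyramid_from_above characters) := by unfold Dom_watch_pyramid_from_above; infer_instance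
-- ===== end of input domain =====

-- B replaces A's three passes (slice-build rows, horizontal mirror of each row, vertical
-- mirror by re-appending rows) with one closed-form row builder applied to every row index
-- r via the ring index min(r, size-1-r); objective: simpler.

-- ===== PORT A =====
-- literal port of A; strings handled as List Char, "\n".join = String.intercalate
def watch_pyramid_from_above (characters : String) : String :=
  let cs := characters.toList
  if cs ≠ [] then        -- 'if characters:' (a non-empty string is truthy)
    let length := cs.length
    -- for i in range(length): pyramid.append(characters[:i] + characters[i] * len(characters[i:]))
    let pyramid : List (List Char) :=
      (List.range length).foldl (fun py (i : Nat) =>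
        py ++ [PySem.List.slice cs none (some (i : Int)) ++
               List.replicate (PySem.List.slice cs (some (i : Int)) none).length
                 (PySem.List.pyGetD cs (i : Int) ' ')]) []
    -- for i in range(length): pyramid[i] += pyramid[i][-2::-1]
    -- (in-place element-wise update of each row in order, ported as a map over the rows)
    let pyramid := pyramid.map (fun row =>
        row ++ (PySem.List.slice? row (some (-2)) none (-1)).getD [])
    -- for i in range(length - 2, -1, -1): pyramid.append(pyramid[i])
    let pyramid := (PySem.List.pyRange ((length : Int) - 2) (-1) (-1)).foldl
        (fun py i => py ++ [PySem.List.pyGetD py i []]) pyramid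
    String.intercalate "\n" (pyramid.map (fun r => String.ofList r))
  else characters

-- ===== PORT B =====
-- literal port of my B (Source B): each row built directly from i = min(r, size-1-r);
-- characters[:i] with 0 <= i is take, prefix[::-1] is reverse, characters[i] in range is getD
def watch_pyramid_from_above_alt (characters : String) : String :=
  let cs := characters.toList
  if cs ≠ [] then
    let size := 2 * cs.length - 1
    String.intercalate "\n" ((List.range size).map (fun r =>
      let i := min r (size - 1 - r)
      let pre := cs.take i
      String.ofList (pre ++ List.replicate (size - 2 * i) (cs.getD i ' ') ++ pre.reverse)))
  else characters

-- ===== PRECONDITION & SPEC =====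
def Spec_watch_pyramid_from_above (characters : String) (out : String) : Prop := out = watch_pyramid_from_above_alt characters
instance (characters : String) (out : String) : Decidable (Spec_watch_pyramid_from_above characters out) := by unfold Spec_watch_pyramid_from_above; infer_instance

-- ===== CLAIM (what is proved, stated in full; the proofs are below) =====
def Claim_equal_watch_pyramid_from_above : Prop := ∀ (characters : String), Dom_watch_pyramid_from_above characters → Spec_watch_pyramid_from_above characters (watch_pyramid_from_above characters)

-- ===== LEMMAS AND PROOFS =====

theorem pv_filterMap_range {α : Type} (g : Nat → Option α) (h' : Nat → α) (c : Nat)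
    (hg : ∀ k < c, g k = some (h' k)) :
    List.filterMap g (List.range c) = (List.range c).map h' := by
  induction c with
  | zero => simp
  | succ m ih =>
    rw [List.range_succ, List.filterMap_append, List.map_append,
      ih (fun k hk => hg k (by omega))]
    simp [hg m (by omega)]

theorem pv_slice_neg2 (xs : List Char) :
    (PySem.List.slice? xs (some (-2)) none (-1)).getD [] = xs.dropLast.reverse := by
  have hstep : (-1 : Int) ≠ 0 := by norm_num
  simp only [PySem.List.slice?, PySem.List.sliceIndices, if_neg hstep]
  norm_num
  by_cases h2 : 2 ≤ xs.length
  · have hmax : max (-2 + (xs.length : Int)) (-1) = (xs.length : Int) - 2 := by omega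
    rw [hmax]
    have hcnt : ((xs.length : Int) - 2 + 1).toNat = xs.length - 1 := by omega
    rw [if_pos (show 1 < xs.length by omega), hcnt]
    rw [pv_filterMap_range _ (fun k => xs.getD (xs.length - 2 - k) ' ') _
      (fun k hk => by
        have hidx : ((xs.length : Int) - 2 + -(k : Int)).toNat = xs.length - 2 - k := by omega
        rw [hidx, List.getElem?_eq_getElem (by omega)]
        simp [List.getElem?_eq_getElem (show xs.length - 2 - k < xs.length by omega)])]
    apply List.ext_getElem
    · simp
    · intro j hj hj'
      simp only [List.length_map, List.length_range] at hj
      simp only [List.length_reverse, List.length_dropLast] at hj'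
      simp only [List.getElem_map, List.getElem_range, List.getElem_reverse,
        List.getElem_dropLast, List.length_dropLast,
        List.getD_eq_getElem _ _ (show xs.length - 2 - j < xs.length by omega)]
      congr 1
  · have hmax : max (-2 + (xs.length : Int)) (-1) = -1 := by omega
    rw [hmax]
    cases xs with
    | nil => simp
    | cons a t =>
      cases t with
      | nil => simp
      | cons b t' => exfalso; simp at h2

theorem pv_append_loop (base acc : List (List Char)) (l : List Int)
    (h : ∀ i ∈ l, 0 ≤ i ∧ i.toNat < base.length) :
    l.foldl (fun py i => py ++ [PySem.List.pyGetD py i []]) (base ++ acc) =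
      base ++ acc ++ l.map (fun i => base.getD i.toNat []) := by
  induction l generalizing acc with
  | nil => simp
  | cons i l ih =>
    obtain ⟨h0, hlt⟩ := h i (List.mem_cons_self)
    have hcast : i = ((i.toNat : Nat) : Int) := by omega
    rw [List.foldl_cons]
    have hget : PySem.List.pyGetD (base ++ acc) i [] = base.getD i.toNat [] := by
      rw [hcast, PySem.List.pyGetD_natCast]
      rw [List.getD_eq_getElem _ _ (by simp; omega), List.getElem_append]
      simp [hlt]
      rw [show (max i 0).toNat = i.toNat by omega, List.getElem?_eq_getElem hlt]
      simp
    rw [hget, List.append_assoc base acc]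
    rw [ih (acc ++ [base.getD i.toNat []]) (fun j hj => h j (List.mem_cons_of_mem _ hj))]
    simp

def pvHalfRow (cs : List Char) (i : Nat) : List Char :=
  cs.take i ++ List.replicate (cs.length - i) (cs.getD i ' ')

def pvFullRow (cs : List Char) (i : Nat) : List Char :=
  pvHalfRow cs i ++ (pvHalfRow cs i).dropLast.reverse

theorem pvFullRow_closed (cs : List Char) (i : Nat) (h : i < cs.length) :
    pvFullRow cs i =
      cs.take i ++ List.replicate (2 * cs.length - 1 - 2 * i) (cs.getD i ' ') ++
        (cs.take i).reverse := by
  unfold pvFullRow pvHalfRow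
  rw [show cs.length - i = (cs.length - i - 1) + 1 by omega, List.replicate_succ',
    show 2 * cs.length - 1 - 2 * i = (cs.length - i - 1) + 1 + (cs.length - i - 1) by omega,
    List.replicate_add, List.replicate_succ']
  rw [← List.append_assoc, List.dropLast_concat, List.reverse_append, List.reverse_replicate]
  simp [List.append_assoc]

theorem pv_rows_eq (cs : List Char) (h : cs ≠ []) :
    (List.range cs.length).map (pvFullRow cs) ++
      (List.range (cs.length - 1)).map (fun k => pvFullRow cs (cs.length - 2 - k)) =
    (List.range (2 * cs.length - 1)).map
      (fun r => pvFullRow cs (min r (2 * cs.length - 1 - 1 - r))) := by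
  have hn : 1 ≤ cs.length := List.length_pos_iff.mpr h
  apply List.ext_getElem
  · simp; omega
  · intro r hr hr'
    simp only [List.length_append, List.length_map, List.length_range] at hr
    simp only [List.getElem_append, List.length_map, List.length_range,
      List.getElem_map, List.getElem_range]
    split_ifs with h'
    · congr 1; omega
    · congr 1; omega

theorem pv_main (characters : String) : watch_pyramid_from_above characters = watch_pyramid_from_above_alt characters := by
  unfold watch_pyramid_from_above watch_pyramid_from_above_alt
  by_cases h : characters.toList = []
  · simp [h]
  · simp only [h, ne_eq, not_false_eq_true, if_pos]
    set cs := characters.toList with hcs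
    have hn : 1 ≤ cs.length := by
      cases hcl : cs with
      | nil => exact absurd hcl h
      | cons a t => simp
    have e1 : (List.range cs.length).foldl (fun py (i : Nat) =>
        py ++ [PySem.List.slice cs none (some (i : Int)) ++
               List.replicate (PySem.List.slice cs (some (i : Int)) none).length
                 (PySem.List.pyGetD cs (i : Int) ' ')]) [] =
        (List.range cs.length).map (pvHalfRow cs) := by
      rw [PySem.List.foldl_append_singleton_eq_map
        (f := fun i : Nat => PySem.List.slice cs none (some (i : Int)) ++
          List.replicate (PySem.List.slice cs (some (i : Int)) none).length
            (PySem.List.pyGetD cs (i : Int) ' ')), List.nil_append]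
      exact List.map_congr_left (fun i _ => by
        simp [PySem.List.slice_to_natCast, PySem.List.slice_from_natCast,
          PySem.List.pyGetD_natCast, pvHalfRow])
    rw [e1, List.map_map]
    have e2 : (List.range cs.length).map
        ((fun row => row ++ (PySem.List.slice? row (some (-2)) none (-1)).getD []) ∘ pvHalfRow cs) =
        (List.range cs.length).map (pvFullRow cs) :=
      List.map_congr_left (fun i _ => by
        simp only [Function.comp_apply, pv_slice_neg2, pvFullRow])
    rw [e2]
    have e3 : (PySem.List.pyRange ((cs.length : Int) - 2) (-1) (-1)).foldl
        (fun py i => py ++ [PySem.List.pyGetD py i []])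
        ((List.range cs.length).map (pvFullRow cs)) =
        (List.range (2 * cs.length - 1)).map
          (fun r => pvFullRow cs (min r (2 * cs.length - 1 - 1 - r))) := by
      rw [PySem.List.pyRange_neg_one,
        show ((cs.length : Int) - 2 - (-1)).toNat = cs.length - 1 by omega]
      have hfold := pv_append_loop ((List.range cs.length).map (pvFullRow cs)) []
        ((List.range (cs.length - 1)).map (fun (k : Nat) => (cs.length : Int) - 2 - (k : Int)))
        (by
          intro i hi
          rw [List.mem_map] at hi
          obtain ⟨k, hk, rfl⟩ := hi
          rw [List.mem_range] at hk
          simp only [List.length_map, List.length_range]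
          omega)
      rw [List.append_nil] at hfold
      rw [hfold, List.map_map]
      have e4 : (List.range (cs.length - 1)).map
          ((fun i : Int => ((List.range cs.length).map (pvFullRow cs)).getD i.toNat []) ∘
            (fun k : Nat => (cs.length : Int) - 2 - (k : Int))) =
          (List.range (cs.length - 1)).map (fun k => pvFullRow cs (cs.length - 2 - k)) :=
        List.map_congr_left (fun k hk => by
          rw [List.mem_range] at hk
          simp only [Function.comp_apply]
          rw [show ((cs.length : Int) - 2 - (k : Int)).toNat = cs.length - 2 - k by omega,
            PySem.List.getD_map_range _ _ _ _ (by omega)])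
      rw [e4, pv_rows_eq cs h]
    rw [e3, List.map_map]
    exact congrArg (String.intercalate "\n") (List.map_congr_left (fun r hr => by
      rw [List.mem_range] at hr
      simp only [Function.comp_apply]
      rw [pvFullRow_closed cs _ (by omega)]))

-- ===== VERDICT (by name: the statement is the Claim_ definition above) =====
theorem watch_pyramid_from_above_spec : Claim_equal_watch_pyramid_from_above := by
  intro characters _
  unfold Spec_watch_pyramid_from_above
  exact pv_main characters
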